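-- pv_equiv track=rewrite | github.com/google/proto-quic | src/tools/binary_size/function_signature.py | _FindReturnValueSpace
-- ===== SOURCE A (Python) =====
-- def _FindLastCharOutsideOfBrackets(name, target_char, prev_idx=None):
--   """Returns the last index of |target_char| that is not within ()s nor <>s."""
--   paren_balance_count = 0
--   template_balance_count = 0
--   while True:
--     idx = name.rfind(target_char, 0, prev_idx)
--     if idx == -1:
--       return -1
--     # It is much faster to use.find() and.count() than to loop over each
--     # character.
--     template_balance_count += (
--         name.count('<', idx, prev_idx) - name.count('>', idx, prev_idx))
--     paren_balance_count += (
--         name.count('(', idx, prev_idx) - name.count(')', idx, prev_idx))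
--     if template_balance_count == 0 and paren_balance_count == 0:
--       return idx
--     prev_idx = idx
--
-- def _FindReturnValueSpace(name, paren_idx):
--   """Returns the index of the space that comes after the return type."""
--   space_idx = paren_idx
--   # Special case: const cast operators (see tests).
--   if -1 != name.find(' const', paren_idx - 6, paren_idx):
--     space_idx = paren_idx - 6
--   while True:
--     space_idx = _FindLastCharOutsideOfBrackets(name, ' ', space_idx)
--     # Special case: "operator new", and "operator<< <template>".
--     if -1 == space_idx or (
--         -1 == name.find('operator', space_idx - 8, space_idx) and
--         -1 == name.find('operator<<', space_idx - 10, space_idx)):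
--       break
--     space_idx -= 8
--   return space_idx
-- ===== SOURCE B (Python) =====
-- def _find_last_char_outside_brackets(name, target_char, prev_idx):
--   """Single right-to-left pass with running bracket balances over [i, end)."""
--   n = len(name)
--   if prev_idx < 0:
--     end = n + prev_idx
--     if end < 0:
--       end = 0
--   else:
--     end = min(prev_idx, n)
--   tb = 0
--   pb = 0
--   for i in range(end - 1, -1, -1):
--     ch = name[i]
--     if ch == '<':
--       tb += 1
--     elif ch == '>':
--       tb -= 1
--     elif ch == '(':
--       pb += 1
--     elif ch == ')':
--       pb -= 1
--     if ch == target_char and tb == 0 and pb == 0: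
--       return i
--   return -1
--
--
-- def _FindReturnValueSpace(name, paren_idx):
--   """Returns the index of the space that comes after the return type."""
--   space_idx = paren_idx
--   if -1 != name.find(' const', paren_idx - 6, paren_idx):
--     space_idx = paren_idx - 6
--   while True:
--     space_idx = _find_last_char_outside_brackets(name, ' ', space_idx)
--     if -1 == space_idx or (
--         -1 == name.find('operator', space_idx - 8, space_idx) and
--         -1 == name.find('operator<<', space_idx - 10, space_idx)):
--       break
--     space_idx -= 8
--   return space_idx
-- ===== Notes on version B (the rewrite author's own statement) =====
-- stated objective: alternative
-- what changed: The inner _FindLastCharOutsideOfBrackets search (repeated rfind hops, each re-counting '<'/'>'/'('/')' over the hopped region) is replaced by a single right-to-left character scan that maintains running parenthesis/angle-bracket balances and returns at the first space where both balances are zero; the outer const/operator special-case loop is unchanged.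
import Mathlib
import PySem

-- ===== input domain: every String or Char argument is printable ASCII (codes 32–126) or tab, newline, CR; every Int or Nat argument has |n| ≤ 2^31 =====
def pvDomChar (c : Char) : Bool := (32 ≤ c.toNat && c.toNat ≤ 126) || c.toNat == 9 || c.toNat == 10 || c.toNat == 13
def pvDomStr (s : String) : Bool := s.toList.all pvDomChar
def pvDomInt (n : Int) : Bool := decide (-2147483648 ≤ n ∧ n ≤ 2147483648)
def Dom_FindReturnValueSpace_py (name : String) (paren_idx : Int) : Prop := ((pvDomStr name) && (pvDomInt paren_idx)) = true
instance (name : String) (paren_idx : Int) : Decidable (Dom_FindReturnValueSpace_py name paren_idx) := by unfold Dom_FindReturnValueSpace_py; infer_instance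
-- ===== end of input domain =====

-- B replaces A's inner search (repeated rfind + two bracket counts per hop) by a single
-- right-to-left scan carrying running bracket balances (objective: alternative decomposition;
-- the outer special-case loop is unchanged). No argument is mutated.

-- ===== PORT A =====
-- _FindLastCharOutsideOfBrackets: the while-True loop, one fuel unit per iteration
-- (idx strictly decreases below the clamped end bound, so `name.length + 1` fuel is never
-- exhausted; the fuel-0 branch is unreachable). The helper's `prev_idx=None` default is
-- specialised to Int: every call site in _FindReturnValueSpace passes an int.
-- `name.count(ch, i, j)` is ported as PySem.Chars.count of the slice name[i:j] — exact for
-- a 1-character needle, which is all A counts.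
def pvFindLoopA (s : List Char) (c : Char) (t p prev : Int) : Nat → Int
  | 0 => -1
  | fuel+1 =>
    let idx := PySem.Chars.rfindFrom s [c] 0 (some prev)
    if idx = -1 then -1
    else
      let t := t + ((PySem.Chars.count (PySem.List.slice s (some idx) (some prev)) ['<'] : Int)
                    - (PySem.Chars.count (PySem.List.slice s (some idx) (some prev)) ['>'] : Int))
      let p := p + ((PySem.Chars.count (PySem.List.slice s (some idx) (some prev)) ['('] : Int)
                    - (PySem.Chars.count (PySem.List.slice s (some idx) (some prev)) [')'] : Int))
      if t = 0 ∧ p = 0 then idx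
      else pvFindLoopA s c t p idx fuel

def pvFindLastA (s : List Char) (c : Char) (prev : Int) : Int :=
  pvFindLoopA s c 0 0 prev (s.length + 1)

-- the while-True loop of _FindReturnValueSpace; a continuing iteration forces the found
-- index ≥ 8 and later indices strictly decrease, so `name.length + 2` fuel is never exhausted
def pvOuterA (s : List Char) (space_idx : Int) : Nat → Int
  | 0 => space_idx
  | fuel+1 =>
    let space_idx := pvFindLastA s ' ' space_idx
    if space_idx = -1 ∨
        (PySem.Chars.findFrom s "operator".toList (space_idx - 8) (some space_idx) = -1 ∧
         PySem.Chars.findFrom s "operator<<".toList (space_idx - 10) (some space_idx) = -1) then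
      space_idx
    else pvOuterA s (space_idx - 8) fuel

def FindReturnValueSpace_py (name : String) (paren_idx : Int) : Int :=
  let s := name.toList
  let space_idx :=
    if PySem.Chars.findFrom s " const".toList (paren_idx - 6) (some paren_idx) ≠ -1 then
      paren_idx - 6
    else paren_idx
  pvOuterA s space_idx (s.length + 2)

-- ===== PORT B =====
-- Python-slice clamp of the end bound (Source B computes it with the same if-chain)
def pvClampEnd (n : Nat) (prev : Int) : Nat :=
  if prev < 0 then (if (n : Int) + prev < 0 then 0 else ((n : Int) + prev).toNat)
  else min prev.toNat n

-- Source B's `for i in range(end-1, -1, -1)` loop with running balances tb/pb, as structural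
-- recursion on the reversed prefix name[:end] (head = name[end-1], whose index = rest.length)
def pvScanB (c : Char) : List Char → Int → Int → Int
  | [], _, _ => -1
  | ch :: rest, tb, pb =>
    let tb := if ch = '<' then tb + 1 else if ch = '>' then tb - 1 else tb
    let pb := if ch = '(' then pb + 1 else if ch = ')' then pb - 1 else pb
    if ch = c ∧ tb = 0 ∧ pb = 0 then (rest.length : Int)
    else pvScanB c rest tb pb

def pvFindLastB (s : List Char) (c : Char) (prev : Int) : Int :=
  pvScanB c ((s.take (pvClampEnd s.length prev)).reverse) 0 0

-- same while-True outer loop as Source B (identical to A's outer loop, as the hint prescribes)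
def pvOuterB (s : List Char) (space_idx : Int) : Nat → Int
  | 0 => space_idx
  | fuel+1 =>
    let space_idx := pvFindLastB s ' ' space_idx
    if space_idx = -1 ∨
        (PySem.Chars.findFrom s "operator".toList (space_idx - 8) (some space_idx) = -1 ∧
         PySem.Chars.findFrom s "operator<<".toList (space_idx - 10) (some space_idx) = -1) then
      space_idx
    else pvOuterB s (space_idx - 8) fuel

def FindReturnValueSpace_py_alt (name : String) (paren_idx : Int) : Int :=
  let s := name.toList
  let space_idx :=
    if PySem.Chars.findFrom s " const".toList (paren_idx - 6) (some paren_idx) ≠ -1 then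
      paren_idx - 6
    else paren_idx
  pvOuterB s space_idx (s.length + 2)

-- ===== PRECONDITION & SPEC =====
def Spec_FindReturnValueSpace_py (name : String) (paren_idx : Int) (out : Int) : Prop := out = FindReturnValueSpace_py_alt name paren_idx
instance (name : String) (paren_idx : Int) (out : Int) : Decidable (Spec_FindReturnValueSpace_py name paren_idx out) := by unfold Spec_FindReturnValueSpace_py; infer_instance

-- ===== CLAIM (what is proved, stated in full; the proofs are below) =====
def Claim_equal_FindReturnValueSpace_py : Prop := ∀ (name : String) (paren_idx : Int), Dom_FindReturnValueSpace_py name paren_idx → Spec_FindReturnValueSpace_py name paren_idx (FindReturnValueSpace_py name paren_idx)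

-- ===== LEMMAS AND PROOFS =====

-- `[c].isPrefixOf l` tests the head character
theorem pv_prefix_single (c : Char) (l : List Char) :
    List.isPrefixOf [c] l = (l.head? == some c) := by
  cases l with
  | nil => rfl
  | cons h t => simp [List.isPrefixOf, eq_comm]

-- Chars.count with a 1-character needle is List.count
theorem pv_count_go (c : Char) :
    ∀ (fuel : Nat) (l : List Char) (acc : Nat), l.length ≤ fuel →
      PySem.Chars.count.go [c] fuel l acc = acc + l.count c := by
  intro fuel
  induction fuel with
  | zero => intro l acc h; obtain rfl := List.eq_nil_of_length_eq_zero (Nat.le_zero.mp h); rfl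
  | succ n ih =>
    intro l acc h
    cases l with
    | nil => simp [PySem.Chars.count.go]
    | cons x t =>
      simp only [PySem.Chars.count.go, pv_prefix_single]
      by_cases hx : x = c
      · simp only [hx, List.head?_cons, beq_self_eq_true, if_pos]
        simp only [List.length_cons] at h
        rw [ih _ _ (by simpa using h)]
        simp
        omega
      · rw [if_neg (by simp [hx])]
        simp only [List.length_cons] at h
        rw [ih _ _ (by omega)]
        simp [hx]

theorem pv_count_single (l : List Char) (c : Char) :
    PySem.Chars.count l [c] = l.count c := by
  simp [PySem.Chars.count, pv_count_go c l.length l 0 le_rfl]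

-- rfind(c, 0, P) is rfind on the clamped prefix
theorem pv_rfindFrom_clamp (s : List Char) (c : Char) (P : Int) :
    PySem.Chars.rfindFrom s [c] 0 (some P)
      = PySem.Chars.rfind (s.take (PySem.List.clampIdx s.length P)) [c] := by
  simp only [PySem.Chars.rfindFrom]
  have he : (if (s.length : Int) < P then (s.length : Int)
      else if P < 0 then (if P + (s.length : Int) < 0 then 0 else P + (s.length : Int)) else P)
      = ((PySem.List.clampIdx s.length P : Nat) : Int) := by
    unfold PySem.List.clampIdx
    split_ifs <;> omega
  rw [he]
  have h0 : ¬ ((0:Int) < 0) := by omega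
  rw [if_neg h0]
  have h1 : ¬ (((PySem.List.clampIdx s.length P : Nat) : Int) < 0) := by omega
  rw [if_neg h1]
  simp only [Int.toNat_natCast, Int.toNat_zero, List.drop_zero]
  split <;> omega

-- the count slice s[k:P] (0 ≤ k ≤ clamped end) is a suffix of the clamped prefix
theorem pv_slice_clamp (s : List Char) (P : Int) (k : Nat)
    (hk : k ≤ PySem.List.clampIdx s.length P) :
    PySem.List.slice s (some (k : Int)) (some P)
      = (s.take (PySem.List.clampIdx s.length P)).drop k := by
  have ha : PySem.List.clampIdx s.length (k : Int) = min k s.length := by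
    simp [PySem.List.clampIdx]
  show List.take (PySem.List.clampIdx s.length P - PySem.List.clampIdx s.length (k : Int))
      (List.drop (PySem.List.clampIdx s.length (k : Int)) s)
      = (s.take (PySem.List.clampIdx s.length P)).drop k
  have hle := PySem.List.clampIdx_le (n := s.length) (i := P)
  have hm : min k s.length = k := by omega
  rw [ha, hm, List.drop_take]

theorem pv_go_zero (l : List Char) (c : Char) :
    PySem.Chars.rfind.go l [c] 0 = if l[0]? = some c then 0 else -1 := by
  simp [PySem.Chars.rfind.go, pv_prefix_single, List.head?_eq_getElem?]

theorem pv_go_succ (l : List Char) (c : Char) (j : Nat) :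
    PySem.Chars.rfind.go l [c] (j+1)
      = if l[j+1]? = some c then ((j:Int)+1) else PySem.Chars.rfind.go l [c] j := by
  simp [PySem.Chars.rfind.go, pv_prefix_single, List.head?_drop]

-- rfind.go searches indices j, j-1, …, 0 for the character
theorem pv_go_spec (l : List Char) (c : Char) :
    ∀ j, (PySem.Chars.rfind.go l [c] j = -1 ∧ c ∉ l.take (j+1)) ∨
      ∃ k : Nat, k ≤ j ∧ PySem.Chars.rfind.go l [c] j = (k : Int) ∧ l[k]? = some c ∧
        c ∉ (l.take (j+1)).drop (k+1) := by
  intro j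
  induction j with
  | zero =>
    rw [pv_go_zero]
    by_cases h : l[0]? = some c
    · exact Or.inr ⟨0, le_rfl, by simp [h], h, by simp⟩
    · refine Or.inl ⟨by simp [h], ?_⟩
      rw [List.take_one]
      intro hmem
      exact h (by cases hx : l.head? <;> simp_all [List.head?_eq_getElem?])
  | succ j ih =>
    rw [pv_go_succ]
    by_cases h : l[j+1]? = some c
    · refine Or.inr ⟨j+1, le_rfl, by simp [h], h, ?_⟩
      simp
    · rw [if_neg h]
      have htake : l.take (j+1+1) = l.take (j+1) ++ (l[j+1]?).toList := by
        simpa using (List.take_add_one (l := l) (i := j+1))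
      rcases ih with ⟨h1, h2⟩ | ⟨k, hk, h1, h2, h3⟩
      · refine Or.inl ⟨h1, ?_⟩
        rw [htake]
        simp only [List.mem_append, not_or]
        exact ⟨h2, fun hmem => h (by cases hx : l[j+1]? <;> simp_all)⟩
      · refine Or.inr ⟨k, by omega, h1, h2, ?_⟩
        have hkl : k < l.length := (List.getElem?_eq_some_iff.mp h2).1
        rw [htake, List.drop_append_of_le_length, List.mem_append, not_or]
        · exact ⟨h3, fun hmem => h (by cases hx : l[j+1]? <;> simp_all)⟩
        · simp only [List.length_take]
          omega

-- rfind l [c] is the last occurrence of c in l (or -1)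
theorem pv_rfind_single_spec (l : List Char) (c : Char) :
    (PySem.Chars.rfind l [c] = -1 ∧ c ∉ l) ∨
      ∃ k : Nat, PySem.Chars.rfind l [c] = (k : Int) ∧ k < l.length ∧ l[k]? = some c ∧
        c ∉ l.drop (k+1) := by
  have h := pv_go_spec l c l.length
  rcases h with ⟨h1, h2⟩ | ⟨k, hk, h1, h2, h3⟩
  · exact Or.inl ⟨h1, by simpa [List.take_of_length_le] using h2⟩
  · refine Or.inr ⟨k, h1, ?_, h2, ?_⟩
    · exact (List.getElem?_eq_some_iff.mp h2).1
    · have : l.take (l.length + 1) = l := List.take_of_length_le (by omega)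
      rwa [this] at h3

theorem pv_scanB_no_c (c : Char) (l : List Char) (t p : Int) (h : c ∉ l) :
    pvScanB c l t p = -1 := by
  induction l generalizing t p with
  | nil => rfl
  | cons ch rest ih =>
    simp only [List.mem_cons, not_or] at h
    simp only [pvScanB]
    rw [if_neg (by simp [Ne.symm h.1])]
    exact ih _ _ h.2

-- scanning a c-free stretch only accumulates its bracket counts
theorem pv_scanB_skip (c : Char) (m rest : List Char) (t p : Int) (h : c ∉ m) :
    pvScanB c (m ++ rest) t p
      = pvScanB c rest (t + ((m.count '<' : Int) - m.count '>'))
          (p + ((m.count '(' : Int) - m.count ')')) := by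
  induction m generalizing t p with
  | nil => simp
  | cons ch m' ih =>
    simp only [List.mem_cons, not_or] at h
    simp only [List.cons_append, pvScanB]
    rw [if_neg (by simp [Ne.symm h.1])]
    rw [ih _ _ h.2]
    congr 1 <;> · simp [List.count_cons]; split_ifs with h1 h2 <;> simp_all <;> ring

-- one balance update step equals extending the counted stretch by its head
theorem pv_delta (t : Int) (c : Char) (d : List Char) (x y : Char) (hxy : x ≠ y) :
    (if c = x then t + ((d.count x : Int) - d.count y) + 1
     else if c = y then t + ((d.count x : Int) - d.count y) - 1
     else t + ((d.count x : Int) - d.count y))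
    = t + (((c :: d).count x : Int) - (c :: d).count y) := by
  by_cases h1 : c = x
  · subst h1
    simp [hxy]
    ring
  · by_cases h2 : c = y
    · subst h2
      simp [h1]
      ring
    · simp [h1, h2]

-- the heart of the proof: A's hop-and-count loop equals B's right-to-left balance scan
theorem pv_inner_eq_aux (s : List Char) (c : Char) :
    ∀ fuel (P t p : Int), PySem.List.clampIdx s.length P < fuel →
      pvFindLoopA s c t p P fuel
        = pvScanB c ((s.take (PySem.List.clampIdx s.length P)).reverse) t p := by
  intro fuel
  induction fuel with
  | zero => intro P t p h; omega
  | succ f ih =>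
    intro P t p hf
    have hEn : PySem.List.clampIdx s.length P ≤ s.length := PySem.List.clampIdx_le _ _
    set E := PySem.List.clampIdx s.length P with hE
    set l := s.take E with hl
    have hlen : l.length = E := by simp [hl]; omega
    simp only [pvFindLoopA, pv_rfindFrom_clamp]
    rcases pv_rfind_single_spec l c with ⟨h1, h2⟩ | ⟨k, h1, hk, hkc, hnc⟩
    · rw [← hE, ← hl, h1, if_pos rfl]
      exact (pv_scanB_no_c c l.reverse t p (by simpa using h2)).symm
    · rw [← hE, ← hl, h1]
      rw [if_neg (by omega)]
      have hkE : k < E := by omega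
      have hslice : PySem.List.slice s (some ((k : Nat) : Int)) (some P) = l.drop k := by
        rw [hl, hE]; exact pv_slice_clamp s P k (by omega)
      have hgk : l[k] = c := ((List.getElem?_eq_some_iff.mp hkc).2)
      have hdk : l.drop k = c :: l.drop (k+1) := by
        rw [List.drop_eq_getElem_cons (by omega), hgk]
      set d := l.drop (k+1) with hd
      have hrev : l.reverse = d.reverse ++ (c :: (l.take k).reverse) := by
        conv_lhs => rw [← List.take_append_drop k l, hdk]
        simp
      rw [hrev, pv_scanB_skip c _ _ _ _ (by simpa using hnc)]
      simp only [pvScanB]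
      rw [hslice]
      simp only [pv_count_single, List.count_reverse]
      rw [pv_delta t c d '<' '>' (by decide), pv_delta p c d '(' ')' (by decide), ← hdk]
      simp only [true_and]
      have hlenk : ((l.take k).reverse.length : Int) = (k : Int) := by
        simp only [List.length_reverse, List.length_take, hlen]
        omega
      rw [hlenk]
      have htk : l.take k = s.take k := by
        rw [hl, List.take_take]
        congr 1; omega
      have hck : PySem.List.clampIdx s.length ((k : Nat) : Int) = k := by
        unfold PySem.List.clampIdx
        rw [if_neg (by omega : ¬((k : Nat) : Int) < 0)]
        omega
      split_ifs with h
      · rfl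
      · rw [ih _ _ _ (by omega : PySem.List.clampIdx s.length ((k : Nat) : Int) < f), hck, htk]

theorem pv_inner_eq (s : List Char) (c : Char) (P : Int) :
    pvFindLastA s c P = pvFindLastB s c P := by
  unfold pvFindLastA pvFindLastB
  have hce : pvClampEnd s.length P = PySem.List.clampIdx s.length P := rfl
  rw [hce]
  exact pv_inner_eq_aux s c (s.length + 1) P 0 0
    (by have := PySem.List.clampIdx_le s.length P; omega)

theorem pv_outer_eq (s : List Char) : ∀ fuel (si : Int),
    pvOuterA s si fuel = pvOuterB s si fuel := by
  intro fuel
  induction fuel with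
  | zero => intro si; rfl
  | succ f ih =>
    intro si
    simp only [pvOuterA, pvOuterB, pv_inner_eq]
    split_ifs with h
    · rfl
    · exact ih _

-- ===== VERDICT (by name: the statement is the Claim_ definition above) =====
theorem FindReturnValueSpace_py_spec : Claim_equal_FindReturnValueSpace_py := by
  intro name paren_idx _
  unfold Spec_FindReturnValueSpace_py FindReturnValueSpace_py FindReturnValueSpace_py_alt
  simp only [pv_outer_eq]
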